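-- pv_equiv track=rewrite | github.com/cattrh/Python-Lessons | Homework_6.py | find_min_max_rows
-- ===== SOURCE A (Python) =====
-- def find_min_max_rows(mat):
--   rows = len(mat)
--   cols = len(mat[0])
--   min_row_index = 0
--   max_row_index = 0
--   min_sum = sum(mat[0])
--   max_sum = sum(mat[0])
--   for i in range(1, rows):
--     row_sum = sum(mat[i])
--     if row_sum < min_sum:
--       min_row_index = i
--       min_sum = row_sum
--     if row_sum > max_sum:
--       max_row_index = i
--       max_sum = row_sum
--   return min_row_index, max_row_index, min_sum, max_sum
-- ===== SOURCE B (Python) =====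
-- def find_min_max_rows(mat):
--   sums = [sum(row) for row in mat]
--   min_sum = min(sums)
--   max_sum = max(sums)
--   return sums.index(min_sum), sums.index(max_sum), min_sum, max_sum
-- ===== Notes on version B (the rewrite author's own statement) =====
-- stated objective: simpler
-- what changed: Replaces the single manual running-min/max loop with index bookkeeping by building the list of row sums and using min/max/index on it.
-- outside the precondition, e.g. on find_min_max_rows([]): A raises IndexError, B raises ValueError
import Mathlib
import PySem

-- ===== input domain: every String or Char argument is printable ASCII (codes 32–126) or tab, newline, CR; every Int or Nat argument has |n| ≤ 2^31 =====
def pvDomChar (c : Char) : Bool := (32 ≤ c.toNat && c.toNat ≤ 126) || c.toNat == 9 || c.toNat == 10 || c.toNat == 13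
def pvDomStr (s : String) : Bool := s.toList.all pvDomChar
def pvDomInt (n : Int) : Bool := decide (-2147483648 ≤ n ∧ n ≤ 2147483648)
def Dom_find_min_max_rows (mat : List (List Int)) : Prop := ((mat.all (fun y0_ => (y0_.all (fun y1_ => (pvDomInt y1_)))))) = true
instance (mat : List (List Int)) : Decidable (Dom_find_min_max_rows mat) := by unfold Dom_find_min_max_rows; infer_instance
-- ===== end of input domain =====

-- B replaces A's single running-min/max loop with index bookkeeping by a row-sum list plus min/max/index (objective: simpler).

-- ===== PORT A =====
def find_min_max_rows (mat : List (List Int)) : Int × Int × Int × Int :=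
  match PySem.List.pyGet? mat 0 with
  | none => (0, 0, 0, 0)  -- mat[0] raises IndexError on an empty matrix: excluded by Pre_
  | some row0 =>
    let s0 : Int := row0.sum
    (PySem.List.pyRange 1 (mat.length : Int) 1).foldl
      (fun (st : Int × Int × Int × Int) i =>
        let rs := (PySem.List.pyGetD mat i []).sum
        let st1 := if rs < st.2.2.1 then (i, st.2.1, rs, st.2.2.2) else st
        if rs > st1.2.2.2 then (st1.1, i, st1.2.2.1, rs) else st1)
      (0, 0, s0, s0)

-- ===== PORT B =====
def find_min_max_rows_alt (mat : List (List Int)) : Int × Int × Int × Int :=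
  let sums := mat.map List.sum
  match PySem.List.min? sums (fun x => x), PySem.List.max? sums (fun x => x) with
  | some mn, some mx =>
      (((PySem.List.index? sums mn).getD 0 : Nat), ((PySem.List.index? sums mx).getD 0 : Nat), mn, mx)
  | _, _ => (0, 0, 0, 0)  -- min([]) raises ValueError on an empty matrix: excluded by Pre_

-- ===== PRECONDITION & SPEC =====
-- Pre_ excludes only the empty matrix, on which A raises IndexError at mat[0] (and B raises ValueError at min([])).
def Pre_find_min_max_rows (mat : List (List Int)) : Prop := mat ≠ []
instance (mat : List (List Int)) : Decidable (Pre_find_min_max_rows mat) := by unfold Pre_find_min_max_rows; infer_instance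
def pvWitness_find_min_max_rows : List (List Int) := [[1, 2], [3], []]

def Spec_find_min_max_rows (mat : List (List Int)) (out : Int × Int × Int × Int) : Prop := out = find_min_max_rows_alt mat
instance (mat : List (List Int)) (out : Int × Int × Int × Int) : Decidable (Spec_find_min_max_rows mat out) := by unfold Spec_find_min_max_rows; infer_instance

-- ===== CLAIM (what is proved, stated in full; the proofs are below) =====
def Claim_equal_find_min_max_rows : Prop := ∀ (mat : List (List Int)), Dom_find_min_max_rows mat → Pre_find_min_max_rows mat → Spec_find_min_max_rows mat (find_min_max_rows mat)

-- ===== LEMMAS AND PROOFS =====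

-- A's loop body, viewed on an (index, row-sum) pair
def pvStep (st : Int × Int × Int × Int) (p : Int × Int) : Int × Int × Int × Int :=
  let st1 := if p.2 < st.2.2.1 then (p.1, st.2.1, p.2, st.2.2.2) else st
  if p.2 > st1.2.2.2 then (st1.1, p.1, st1.2.2.1, p.2) else st1

lemma pv_foldl_min_le (s0 : Int) (t : List Int) : ∀ y ∈ s0 :: t, t.foldl min s0 ≤ y := by
  induction t generalizing s0 with
  | nil => simp
  | cons a t ih =>
    intro y hy
    have h := ih (min s0 a)
    simp only [List.mem_cons, List.foldl_cons] at hy h ⊢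
    have hh := h (min s0 a) (Or.inl rfl)
    rcases hy with rfl | rfl | hy
    · exact le_trans hh (min_le_left _ _)
    · exact le_trans hh (min_le_right _ _)
    · exact h y (Or.inr hy)

lemma pv_le_foldl_max (s0 : Int) (t : List Int) : ∀ y ∈ s0 :: t, y ≤ t.foldl max s0 := by
  induction t generalizing s0 with
  | nil => simp
  | cons a t ih =>
    intro y hy
    have h := ih (max s0 a)
    simp only [List.mem_cons, List.foldl_cons] at hy h ⊢
    have hh := h (max s0 a) (Or.inl rfl)
    rcases hy with rfl | rfl | hy
    · exact le_trans (le_max_left _ _) hh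
    · exact le_trans (le_max_right _ _) hh
    · exact h y (Or.inr hy)

lemma pv_foldl_min_mem (s0 : Int) (t : List Int) : t.foldl min s0 ∈ s0 :: t := by
  induction t generalizing s0 with
  | nil => simp
  | cons a t ih =>
    have h := ih (min s0 a)
    simp only [List.mem_cons, List.foldl_cons] at h ⊢
    rcases h with h | h
    · rcases min_choice s0 a with hc | hc
      · exact Or.inl (h.trans hc)
      · exact Or.inr (Or.inl (h.trans hc))
    · exact Or.inr (Or.inr h)

lemma pv_foldl_max_mem (s0 : Int) (t : List Int) : t.foldl max s0 ∈ s0 :: t := by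
  induction t generalizing s0 with
  | nil => simp
  | cons a t ih =>
    have h := ih (max s0 a)
    simp only [List.mem_cons, List.foldl_cons] at h ⊢
    rcases h with h | h
    · rcases max_choice s0 a with hc | hc
      · exact Or.inl (h.trans hc)
      · exact Or.inr (Or.inl (h.trans hc))
    · exact Or.inr (Or.inr h)

-- A's loop over the row sums with indices from 1 computes the first argmin/argmax and min/max.
lemma pv_main (s0 : Int) (t : List Int) :
    (PySem.List.enumerate t 1).foldl pvStep (0, 0, s0, s0) =
      ((((PySem.List.index? (s0 :: t) (t.foldl min s0)).getD 0 : Nat) : Int),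
       (((PySem.List.index? (s0 :: t) (t.foldl max s0)).getD 0 : Nat) : Int),
       t.foldl min s0, t.foldl max s0) := by
  induction t using List.reverseRecOn with
  | nil =>
    simp [PySem.List.enumerate_nil]
  | append_singleton t x ih =>
    have hminle := pv_foldl_min_le s0 t
    have hmaxle := pv_le_foldl_max s0 t
    have hminmem := pv_foldl_min_mem s0 t
    have hmaxmem := pv_foldl_max_mem s0 t
    have hmnmx : t.foldl min s0 ≤ t.foldl max s0 := hminle _ hmaxmem
    rw [PySem.List.enumerate_append, List.foldl_append, ih]
    have hfm : (t ++ [x]).foldl min s0 = min (t.foldl min s0) x := by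
      rw [List.foldl_append, List.foldl_cons, List.foldl_nil]
    have hfM : (t ++ [x]).foldl max s0 = max (t.foldl max s0) x := by
      rw [List.foldl_append, List.foldl_cons, List.foldl_nil]
    simp only [PySem.List.enumerate_cons, PySem.List.enumerate_nil, List.foldl_cons,
      List.foldl_nil, hfm, hfM, pvStep]
    by_cases h1 : x < t.foldl min s0
    · have hxmx : ¬ x > t.foldl max s0 := by omega
      have hnotmem : x ∉ s0 :: t := fun hx => absurd (hminle x hx) (by omega)
      have hidx : PySem.List.index? ((s0 :: t) ++ [x]) x = some (s0 :: t).length :=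
        PySem.List.index?_append_singleton_self _ x hnotmem
      have hidx2 : PySem.List.index? ((s0 :: t) ++ [x]) (t.foldl max s0)
          = PySem.List.index? (s0 :: t) (t.foldl max s0) :=
        PySem.List.index?_append_of_mem _ hmaxmem
      simp only [List.cons_append] at hidx hidx2
      simp only [h1, if_pos, if_neg hxmx, min_eq_right h1.le, max_eq_left (by omega : x ≤ t.foldl max s0),
        hidx, hidx2, Option.getD_some, List.length_cons]
      push_cast
      ring_nf
    · by_cases h2 : x > t.foldl max s0
      · have hnotmem : x ∉ s0 :: t := fun hx => absurd (hmaxle x hx) (by omega)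
        have hidx : PySem.List.index? ((s0 :: t) ++ [x]) x = some (s0 :: t).length :=
          PySem.List.index?_append_singleton_self _ x hnotmem
        have hidx2 : PySem.List.index? ((s0 :: t) ++ [x]) (t.foldl min s0)
            = PySem.List.index? (s0 :: t) (t.foldl min s0) :=
          PySem.List.index?_append_of_mem _ hminmem
        simp only [List.cons_append] at hidx hidx2
        simp only [if_neg h1, if_pos h2, min_eq_left (by omega : t.foldl min s0 ≤ x),
          max_eq_right h2.le, hidx, hidx2, Option.getD_some, List.length_cons]
        push_cast
        ring_nf
      · have hidx : PySem.List.index? ((s0 :: t) ++ [x]) (t.foldl min s0)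
            = PySem.List.index? (s0 :: t) (t.foldl min s0) :=
          PySem.List.index?_append_of_mem _ hminmem
        have hidx2 : PySem.List.index? ((s0 :: t) ++ [x]) (t.foldl max s0)
            = PySem.List.index? (s0 :: t) (t.foldl max s0) :=
          PySem.List.index?_append_of_mem _ hmaxmem
        simp only [List.cons_append] at hidx hidx2
        simp only [if_neg h1, if_neg h2, min_eq_left (by omega : t.foldl min s0 ≤ x),
          max_eq_left (by omega : x ≤ t.foldl max s0), hidx, hidx2]

-- A's port on a nonempty matrix is the pvStep fold over the enumerated tail of the row sums.
lemma pv_A_eq (r0 : List Int) (rest : List (List Int)) :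
    find_min_max_rows (r0 :: rest) =
      (PySem.List.enumerate (rest.map List.sum) 1).foldl pvStep (0, 0, r0.sum, r0.sum) := by
  have hget : PySem.List.pyGet? (r0 :: rest) 0 = some r0 := by
    simp [PySem.List.pyGet?, PySem.List.pyIdx?]
  have hn : (0 : Int) < PySem.List.len ((r0 :: rest).map List.sum) := by
    simp [PySem.List.len]
  have henum := PySem.List.enumerate_eq_map_pyRange ((r0 :: rest).map List.sum) 0
  rw [PySem.List.pyRange_one_cons hn] at henum
  simp only [List.map_cons, PySem.List.enumerate_cons, List.map_cons] at henum
  have htail : PySem.List.enumerate (rest.map List.sum) 1 =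
      (PySem.List.pyRange 1 (PySem.List.len ((r0 :: rest).map List.sum))).map
        (fun j => (j, PySem.List.pyGetD ((r0 :: rest).map List.sum) j 0)) := by
    exact (List.cons.injEq _ _ _ _ ▸ henum).2
  rw [htail, List.foldl_map]
  simp only [find_min_max_rows, hget]
  have hlen : PySem.List.len ((r0 :: rest).map List.sum) = ((r0 :: rest).length : Int) := by
    simp [PySem.List.len]
  rw [hlen]
  congr 1
  funext st i
  simp only [pvStep]
  rw [← PySem.List.pyGetD_map List.sum (r0 :: rest) i ([] : List Int)]
  rfl

-- ===== VERDICT (by name: the statement is the Claim_ definition above) =====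
theorem find_min_max_rows_spec : Claim_equal_find_min_max_rows := by
  intro mat _ hpre
  unfold Spec_find_min_max_rows
  cases mat with
  | nil => exact absurd rfl hpre
  | cons r0 rest =>
    rw [pv_A_eq, pv_main]
    simp only [find_min_max_rows_alt, List.map_cons, PySem.List.min?_id_cons,
      PySem.List.max?_id_cons]
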